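-- pv_equiv track=rewrite | github.com/aanghelidi/AOC2023 | 2023/day011/main.py | convert_gpos_with_offset
-- ===== SOURCE A (Python) =====
-- def convert_gpos_with_offset(
--     gpos: tuple[int, int], columns: list[int], rows: list[int], factor: int
-- ) -> tuple[int, int]:
--     x, y = gpos
--     dx = sum(x > e for e in columns)
--     dy = sum(y > e for e in rows)
--     new_x = x + (dx * factor) - dx
--     new_y = y + (dy * factor) - dy
--     return (new_x, new_y)
-- ===== SOURCE B (Python) =====
-- def convert_gpos_with_offset(
--     gpos: tuple[int, int], columns: list[int], rows: list[int], factor: int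
-- ) -> tuple[int, int]:
--     def count_lt(sorted_xs, v):
--         # number of elements < v, by binary search on a sorted list
--         lo, hi = 0, len(sorted_xs)
--         while lo < hi:
--             mid = (lo + hi) // 2
--             if sorted_xs[mid] < v:
--                 lo = mid + 1
--             else:
--                 hi = mid
--         return lo
--
--     x, y = gpos
--     cs = sorted(columns)
--     rs = sorted(rows)
--     dx = count_lt(cs, x)
--     dy = count_lt(rs, y)
--     return (x + dx * (factor - 1), y + dy * (factor - 1))
-- ===== Notes on version B (the rewrite author's own statement) =====
-- stated objective: alternative
-- what changed: Replaces the linear 0/1 generator sums with sort + hand-written bisect_left binary search counting elements below each coordinate, and folds the offset arithmetic into d*(factor-1).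
import Mathlib
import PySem

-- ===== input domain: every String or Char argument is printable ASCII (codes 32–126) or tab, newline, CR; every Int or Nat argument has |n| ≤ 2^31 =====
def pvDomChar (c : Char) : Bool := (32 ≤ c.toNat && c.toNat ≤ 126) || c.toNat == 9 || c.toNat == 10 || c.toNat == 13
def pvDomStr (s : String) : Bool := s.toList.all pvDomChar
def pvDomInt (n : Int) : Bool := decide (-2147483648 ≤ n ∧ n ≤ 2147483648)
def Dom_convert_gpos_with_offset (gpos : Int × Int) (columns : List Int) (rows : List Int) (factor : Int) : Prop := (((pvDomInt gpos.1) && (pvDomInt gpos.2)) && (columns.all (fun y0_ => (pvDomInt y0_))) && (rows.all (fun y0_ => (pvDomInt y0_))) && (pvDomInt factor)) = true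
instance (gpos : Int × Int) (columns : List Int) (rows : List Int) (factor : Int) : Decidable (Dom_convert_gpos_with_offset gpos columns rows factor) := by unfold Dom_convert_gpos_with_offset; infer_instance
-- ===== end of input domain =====

-- B replaces the linear 0/1 generator sums with sort + hand-written binary search; return value only.
-- ===== PORT A =====
def convert_gpos_with_offset (gpos : Int × Int) (columns : List Int) (rows : List Int) (factor : Int) : Int × Int :=
  let x := gpos.1
  let y := gpos.2
  let dx : Int := (columns.map (fun e => if x > e then (1 : Int) else 0)).sum
  let dy : Int := (rows.map (fun e => if y > e then (1 : Int) else 0)).sum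
  let new_x := x + (dx * factor) - dx
  let new_y := y + (dy * factor) - dy
  (new_x, new_y)

-- ===== PORT B =====
-- count_lt from Source B: binary search; the index mid always satisfies mid < hi ≤ xs.length,
-- so getD with default 0 is exactly Python's xs[mid] on every reached index.
def countLtAux (xs : List Int) (v : Int) (lo hi : Nat) : Nat :=
  if lo < hi then
    let mid := (lo + hi) / 2
    if xs.getD mid 0 < v then countLtAux xs v (mid + 1) hi
    else countLtAux xs v lo mid
  else lo
termination_by hi - lo
decreasing_by all_goals omega

def convert_gpos_with_offset_alt (gpos : Int × Int) (columns : List Int) (rows : List Int) (factor : Int) : Int × Int :=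
  let x := gpos.1
  let y := gpos.2
  let cs := PySem.List.sorted columns (fun e => e) false
  let rs := PySem.List.sorted rows (fun e => e) false
  let dx : Int := (countLtAux cs x 0 cs.length : Int)
  let dy : Int := (countLtAux rs y 0 rs.length : Int)
  (x + dx * (factor - 1), y + dy * (factor - 1))

-- ===== PRECONDITION & SPEC =====
def Spec_convert_gpos_with_offset (gpos : Int × Int) (columns : List Int) (rows : List Int) (factor : Int) (out : Int × Int) : Prop := out = convert_gpos_with_offset_alt gpos columns rows factor
instance (gpos : Int × Int) (columns : List Int) (rows : List Int) (factor : Int) (out : Int × Int) : Decidable (Spec_convert_gpos_with_offset gpos columns rows factor out) := by unfold Spec_convert_gpos_with_offset; infer_instance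

-- ===== CLAIM (what is proved, stated in full; the proofs are below) =====
def Claim_equal_convert_gpos_with_offset : Prop := ∀ (gpos : Int × Int) (columns : List Int) (rows : List Int) (factor : Int), Dom_convert_gpos_with_offset gpos columns rows factor → Spec_convert_gpos_with_offset gpos columns rows factor (convert_gpos_with_offset gpos columns rows factor)

-- ===== LEMMAS AND PROOFS =====

-- elements of a ≤-sorted list are < v exactly on the takeWhile-prefix
theorem sorted_getD_lt_iff (xs : List Int) (v : Int)
    (hs : xs.Pairwise (· ≤ ·)) :
    ∀ i < xs.length, (xs.getD i 0 < v ↔ i < (xs.takeWhile (fun e => decide (e < v))).length) := by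
  induction xs with
  | nil => intro i hi; simp at hi
  | cons a t ih =>
    intro i hi
    rcases List.pairwise_cons.mp hs with ⟨ha, ht⟩
    by_cases hav : a < v
    · cases i with
      | zero => simp [List.takeWhile, hav]
      | succ j =>
        have hj : j < t.length := by simpa using hi
        have := ih ht j hj
        simp only [List.takeWhile, hav, decide_true, List.getD_cons_succ, List.length_cons]
        simpa [List.getD] using this
    · cases i with
      | zero => simp [List.takeWhile, hav]
      | succ j =>
        have hj : j < t.length := by simpa using hi
        have hmem : t.getD j 0 ∈ t := by
          rw [List.getD_eq_getElem t 0 hj]; exact List.getElem_mem hj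
        have h2 : ¬ t.getD j 0 < v := by
          have := ha _ hmem; omega
        simp only [List.takeWhile, hav, decide_false, List.getD_cons_succ, List.length_nil]
        simpa [List.getD] using h2

-- countP of (· < v) on a ≤-sorted list is the takeWhile-prefix length
theorem sorted_countP_eq_takeWhile (xs : List Int) (v : Int)
    (hs : xs.Pairwise (· ≤ ·)) :
    xs.countP (fun e => decide (e < v)) = (xs.takeWhile (fun e => decide (e < v))).length := by
  induction xs with
  | nil => simp
  | cons a t ih =>
    rcases List.pairwise_cons.mp hs with ⟨ha, ht⟩
    by_cases hav : a < v
    · simp [List.takeWhile, hav, ih ht]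
    · have : t.countP (fun e => decide (e < v)) = 0 := by
        rw [List.countP_eq_zero]
        intro e he
        have := ha e he
        simp; omega
      simp [List.takeWhile, hav, this]

-- the binary-search loop converges to any index k characterising the predicate
theorem countLtAux_eq (xs : List Int) (v : Int) (k : Nat)
    (hchar : ∀ i < xs.length, (xs.getD i 0 < v ↔ i < k)) :
    ∀ lo hi, lo ≤ k → k ≤ hi → hi ≤ xs.length → countLtAux xs v lo hi = k := by
  intro lo hi
  induction lo, hi using countLtAux.induct xs v with
  | case1 lo hi h mid hlt ih =>
    intro hlok hkhi hlen
    rw [countLtAux]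
    simp only [if_pos h]
    rw [if_pos hlt]
    have hm : mid < xs.length := by omega
    have := (hchar mid hm).mp hlt
    exact ih (by omega) hkhi hlen
  | case2 lo hi h mid hlt ih =>
    intro hlok hkhi hlen
    rw [countLtAux]
    simp only [if_pos h]
    rw [if_neg hlt]
    have hm : mid < xs.length := by omega
    have : ¬ mid < k := fun hc => hlt ((hchar mid hm).mpr hc)
    exact ih hlok (by omega) (by omega)
  | case3 lo hi h =>
    intro hlok hkhi hlen
    rw [countLtAux]
    simp only [if_neg h]
    omega

theorem countLtAux_sorted (ys : List Int) (v : Int) :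
    countLtAux (PySem.List.sorted ys (fun e => e) false) v 0
        (PySem.List.sorted ys (fun e => e) false).length
      = ys.countP (fun e => decide (e < v)) := by
  set xs := PySem.List.sorted ys (fun e => e) false with hxs
  have hs : xs.Pairwise (· ≤ ·) := by
    simpa using PySem.List.sorted_pairwise ys (fun e => e)
  have hperm : xs.Perm ys := PySem.List.sorted_perm ys (fun e => e) false
  rw [← hperm.countP_eq, sorted_countP_eq_takeWhile xs v hs]
  exact countLtAux_eq xs v _ (sorted_getD_lt_iff xs v hs) 0 xs.length
    (Nat.zero_le _) ((List.takeWhile_prefix _).length_le) le_rfl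

-- A's 0/1 sum is a countP
theorem sum_ite_eq_countP (xs : List Int) (v : Int) :
    (xs.map (fun e => if v > e then (1 : Int) else 0)).sum
      = (xs.countP (fun e => decide (e < v)) : Int) := by
  induction xs with
  | nil => simp
  | cons a t ih =>
    by_cases h : a < v <;> simp [h, ih, gt_iff_lt] <;> push_cast <;> ring_nf

-- ===== VERDICT (by name: the statement is the Claim_ definition above) =====
theorem convert_gpos_with_offset_spec : Claim_equal_convert_gpos_with_offset := by
  intro gpos columns rows factor _
  unfold Spec_convert_gpos_with_offset convert_gpos_with_offset convert_gpos_with_offset_alt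
  dsimp only
  rw [countLtAux_sorted columns gpos.1, countLtAux_sorted rows gpos.2,
      sum_ite_eq_countP columns gpos.1, sum_ite_eq_countP rows gpos.2]
  rw [Prod.mk.injEq]
  exact ⟨by ring, by ring⟩
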